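-- pv_equiv track=rewrite | github.com/DonkeyN11/fmm_sjtugnc | python/mapbox_3d_viewCPS.py | parse_observation_highlights
-- ===== SOURCE A (Python) =====
-- from typing import Dict, Iterable, List, Optional, Sequence, Tuple, Set
--
-- def parse_observation_highlights(args_highlights: Optional[Sequence[str]]) -> Dict[str, Optional[Set[int]]]:
--     highlights: Dict[str, Optional[Set[int]]] = {}
--     if not args_highlights:
--         return highlights
--
--     for group in args_highlights:
--         for token in group.split(","):
--             item = token.strip()
--             if not item:
--                 continue
--             if item.lower() == "all":
--                 highlights["__all__"] = None
--                 continue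
--             if ":" in item:
--                 traj_id, seq_text = item.split(":", 1)
--                 traj_id = traj_id.strip()
--                 seq_text = seq_text.strip()
--                 if not traj_id or not seq_text:
--                     continue
--                 try:
--                     seq_value = int(seq_text)
--                 except ValueError:
--                     continue
--                 seq_set = highlights.setdefault(traj_id, set())
--                 if seq_set is not None:
--                     seq_set.add(seq_value)
--             else:
--                 traj_id = item
--                 highlights[traj_id] = None
--
--     # If special "__all__" key present, treat as highlight all observations.
--     if "__all__" in highlights:
--         return {"__all__": None}
--
--     return highlights
-- ===== SOURCE B (Python) =====
-- def _classify(token):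
--     # One token -> event: (key, None) for a bare id / "all", (key, int) for "id:seq", or None if invalid.
--     item = token.strip()
--     if not item:
--         return None
--     if item.lower() == "all":
--         return ("__all__", None)
--     if ":" in item:
--         tid, txt = item.split(":", 1)
--         tid = tid.strip()
--         txt = txt.strip()
--         if not tid or not txt:
--             return None
--         try:
--             return (tid, int(txt))
--         except ValueError:
--             return None
--     return (item, None)
--
--
-- def parse_observation_highlights(args_highlights):
--     # Map-reduce in three stages:
--     #   1. parse: flatten all groups/tokens into a list of (key, None|int) events;
--     #   2. group: collect each key's raw value history, in order, untouched;
--     #   3. reduce: each key independently maps to None if its history ever contains a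
--     #      bare marker (None), else to the set of its ints.
--     events = []
--     for group in (args_highlights or []):
--         for token in group.split(","):
--             e = _classify(token)
--             if e is not None:
--                 events.append(e)
--     if any(k == "__all__" for k, _ in events):
--         return {"__all__": None}
--     grouped = {}
--     for k, v in events:
--         grouped.setdefault(k, []).append(v)
--     return {k: (None if None in vs else {v for v in vs if v is not None})
--             for k, vs in grouped.items()}
-- ===== Notes on version B (the rewrite author's own statement) =====
-- stated objective: alternative
-- what changed: A applies the sticky-None dict semantics online, token by token, with setdefault/overwrite on the result dict; B is a staged map-reduce: it first parses every token into a flat (key, None|int) event list, early-returns if any event key is '__all__', then groups each key's raw value history unchanged, and finally reduces each history independently (None iff a bare marker occurs in it, else the set of its ints).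
import Mathlib
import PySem

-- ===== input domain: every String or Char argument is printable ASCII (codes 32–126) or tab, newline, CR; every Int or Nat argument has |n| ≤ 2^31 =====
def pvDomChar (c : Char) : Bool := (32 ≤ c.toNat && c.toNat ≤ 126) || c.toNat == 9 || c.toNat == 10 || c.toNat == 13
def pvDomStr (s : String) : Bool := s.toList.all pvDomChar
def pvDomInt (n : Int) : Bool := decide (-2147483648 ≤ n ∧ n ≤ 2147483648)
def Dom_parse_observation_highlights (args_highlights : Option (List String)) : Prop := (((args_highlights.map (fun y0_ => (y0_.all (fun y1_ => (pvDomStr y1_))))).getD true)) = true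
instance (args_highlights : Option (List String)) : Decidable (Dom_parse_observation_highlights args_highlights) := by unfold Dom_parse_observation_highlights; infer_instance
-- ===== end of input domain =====

-- B replaces A's online single-dict mutation (setdefault / sticky-None overwrites) by a staged
-- map-reduce: parse tokens to an event list, group each key's raw history, reduce per key; same cost.

-- ===== PORT A =====
-- one token of A's inner loop; dict values: none = Python None, some s = a set of ints (PySem.Set)
def pvA_step (h : PySem.Dict String (Option (List Int))) (token : String) :
    PySem.Dict String (Option (List Int)) :=
  let item := PySem.Str.strip token
  if item = "" then h
  else if PySem.Str.lower item = "all" then h.insert "__all__" none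
  else if PySem.Str.isIn ":" item then
    match PySem.Str.splitMax? item ":" 1 with
    | some (t :: s :: _) =>
        let tid := PySem.Str.strip t
        let txt := PySem.Str.strip s
        if tid = "" then h
        else if txt = "" then h
        else
          match PySem.Int.ofStr? txt with
          | none => h            -- ValueError: continue
          | some v =>
            -- seq_set = highlights.setdefault(traj_id, set()); if seq_set is not None: seq_set.add(v)
            match h.get? tid with
            | none => h.insert tid (some (PySem.Set.add PySem.Set.empty v))
            | some none => h
            | some (some s) => h.insert tid (some (PySem.Set.add s v))
    | _ => h                     -- unreachable: ":" ∈ item gives exactly two pieces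
  else h.insert item none

def parse_observation_highlights (args_highlights : Option (List String)) :
    List (String × Option (List Int)) :=
  match args_highlights with
  | none => []                   -- 'if not args_highlights: return {}'
  | some groups =>
    if groups.isEmpty then []
    else
      let h := groups.foldl
        (fun h g => ((PySem.Str.split? g ",").getD []).foldl pvA_step h) PySem.Dict.empty
      if h.contains "__all__" then [("__all__", none)] else h.items

-- ===== PORT B =====
-- _classify: one token -> event (key, none) for bare/"all", (key, some v) for "id:seq", none if invalid
def pvClassify (token : String) : Option (String × Option Int) :=
  let item := PySem.Str.strip token
  if item = "" then none
  else if PySem.Str.lower item = "all" then some ("__all__", none)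
  else if PySem.Str.isIn ":" item then
    match PySem.Str.splitMax? item ":" 1 with
    | some (t :: s :: _) =>
        let tid := PySem.Str.strip t
        let txt := PySem.Str.strip s
        if tid = "" then none
        else if txt = "" then none
        else
          match PySem.Int.ofStr? txt with
          | none => none
          | some v => some (tid, some v)
    | _ => none
  else some (item, none)

-- stage 2: 'grouped.setdefault(k, []).append(v)'
def pvGroupStep (d : PySem.Dict String (List (Option Int))) (e : String × Option Int) :
    PySem.Dict String (List (Option Int)) :=
  d.modify e.1 [] (fun vs => vs ++ [e.2])

-- stage 3 per key: 'None if None in vs else {v for v in vs if v is not None}'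
def pvAgg (vs : List (Option Int)) : Option (List Int) :=
  if none ∈ vs then none
  else some (vs.foldl (fun s v => match v with | some x => PySem.Set.add s x | none => s) [])

def parse_observation_highlights_alt (args_highlights : Option (List String)) :
    List (String × Option (List Int)) :=
  let events := (args_highlights.getD []).flatMap
      (fun g => ((PySem.Str.split? g ",").getD []).filterMap pvClassify)
  if events.any (fun e => e.1 == "__all__") then [("__all__", none)]
  else
    let grouped := events.foldl pvGroupStep PySem.Dict.empty
    grouped.items.map (fun p => (p.1, pvAgg p.2))

-- ===== PRECONDITION & SPEC =====
def Spec_parse_observation_highlights (args_highlights : Option (List String)) (out : List (String × Option (List Int))) : Prop := out = parse_observation_highlights_alt args_highlights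
instance (args_highlights : Option (List String)) (out : List (String × Option (List Int))) : Decidable (Spec_parse_observation_highlights args_highlights out) := by unfold Spec_parse_observation_highlights; infer_instance

-- ===== CLAIM (what is proved, stated in full; the proofs are below) =====
def Claim_equal_parse_observation_highlights : Prop := ∀ (args_highlights : Option (List String)), Dom_parse_observation_highlights args_highlights → Spec_parse_observation_highlights args_highlights (parse_observation_highlights args_highlights)

-- ===== LEMMAS AND PROOFS =====

-- coupling invariant: A's dict is the per-key reduction of B's grouping dict, key for key in order
def pvInv (h : PySem.Dict String (Option (List Int)))
    (g : PySem.Dict String (List (Option Int))) : Prop :=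
  h.items = g.items.map (fun p => (p.1, pvAgg p.2)) ∧ g.keys.Nodup

lemma pv_keys_eq (h : PySem.Dict String (Option (List Int)))
    (g : PySem.Dict String (List (Option Int))) (hI : pvInv h g) : h.keys = g.keys := by
  obtain ⟨hitems, -⟩ := hI
  simp [PySem.Dict.keys, hitems, Function.comp_def]

lemma pv_contains_eq (h : PySem.Dict String (Option (List Int)))
    (g : PySem.Dict String (List (Option Int))) (hI : pvInv h g) (k : String) :
    h.contains k = g.contains k := by
  rw [PySem.Dict.contains_eq_decide_mem_keys, PySem.Dict.contains_eq_decide_mem_keys,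
    pv_keys_eq h g hI]

lemma pv_item_unique (g : PySem.Dict String (List (Option Int))) (hnd : g.keys.Nodup)
    (k : String) (w : List (Option Int)) (hg : g.get? k = some w) :
    ∀ p ∈ g.items, p.1 = k → p = (k, w) := by
  rintro ⟨a, b⟩ hp rfl
  have := PySem.Dict.get?_of_mem_items g hp hnd
  rw [hg] at this
  simp_all

lemma pvAgg_append_bare (vs : List (Option Int)) : pvAgg (vs ++ [none]) = none := by
  simp [pvAgg]

lemma pvAgg_append_seq (vs : List (Option Int)) (v : Int) :
    pvAgg (vs ++ [some v])
      = match pvAgg vs with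
        | none => none
        | some s => some (PySem.Set.add s v) := by
  by_cases hn : (none : Option Int) ∈ vs
  · simp [pvAgg, hn]
  · simp [pvAgg, hn, List.foldl_append]

-- invariant preservation: a bare event (k, None) — A's 'highlights[k] = None'
lemma pvInv_bare (h : PySem.Dict String (Option (List Int)))
    (g : PySem.Dict String (List (Option Int))) (k : String) (hI : pvInv h g) :
    pvInv (h.insert k none) (pvGroupStep g (k, none)) := by
  have hc := pv_contains_eq h g hI k
  obtain ⟨hitems, hnd⟩ := hI
  have hnd' : (g.insert k (g.getD k [] ++ [none])).keys.Nodup := PySem.Dict.nodup_keys_insert _ _ _ hnd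
  refine ⟨?_, by simpa [pvGroupStep, PySem.Dict.modify] using hnd'⟩
  simp only [pvGroupStep, PySem.Dict.modify]
  by_cases hk : g.contains k = true
  · rw [PySem.Dict.items_insert_of_contains _ _ (hc.trans hk),
      PySem.Dict.items_insert_of_contains _ _ hk, hitems, List.map_map, List.map_map]
    refine List.map_congr_left (fun p hp => ?_)
    by_cases hpk : p.1 = k
    · simp [hpk, pvAgg_append_bare]
    · simp [hpk]
  · rw [PySem.Dict.items_insert_of_not_contains _ _ (by simp [hc, hk]),
      PySem.Dict.items_insert_of_not_contains _ _ (by simpa using hk), hitems, List.map_append]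
    simp [pvAgg_append_bare]

-- invariant preservation: a seq event (k, v) — A's setdefault-then-add
lemma pvInv_seq (h : PySem.Dict String (Option (List Int)))
    (g : PySem.Dict String (List (Option Int))) (k : String) (v : Int) (hI : pvInv h g) :
    pvInv (match h.get? k with
           | none => h.insert k (some (PySem.Set.add PySem.Set.empty v))
           | some none => h
           | some (some s) => h.insert k (some (PySem.Set.add s v)))
          (pvGroupStep g (k, some v)) := by
  have hc := pv_contains_eq h g hI k
  have hkeys := pv_keys_eq h g hI
  obtain ⟨hitems, hnd⟩ := hI
  have hnd' : (g.insert k (g.getD k [] ++ [some v])).keys.Nodup :=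
    PySem.Dict.nodup_keys_insert _ _ _ hnd
  refine ⟨?_, by simpa [pvGroupStep, PySem.Dict.modify] using hnd'⟩
  simp only [pvGroupStep, PySem.Dict.modify]
  by_cases hk : g.contains k = true
  · -- key already grouped: let w be its raw history
    have hsome : (g.get? k).isSome := by
      rw [← PySem.Dict.contains_eq_isSome_get? g k]; exact hk
    obtain ⟨w, hw⟩ := Option.isSome_iff_exists.mp hsome
    have hgd : g.getD k [] = w := PySem.Dict.getD_of_get?_eq_some g [] hw
    have hmem : (k, w) ∈ g.items := PySem.Dict.mem_items_of_get?_eq_some g hw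
    have hmemh : (k, pvAgg w) ∈ h.items := by
      rw [hitems]; exact List.mem_map.mpr ⟨(k, w), hmem, rfl⟩
    have hgeth : h.get? k = some (pvAgg w) :=
      PySem.Dict.get?_of_mem_items h hmemh (hkeys ▸ hnd)
    rw [hgeth, hgd]
    have hmap : (g.insert k (w ++ [some v])).items.map (fun p => (p.1, pvAgg p.2))
        = h.items.map (fun p => if p.1 == k then (k, pvAgg (w ++ [some v])) else p) := by
      rw [PySem.Dict.items_insert_of_contains _ _ hk, hitems, List.map_map, List.map_map]
      refine (List.map_congr_left (fun p hp => ?_)).symm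
      by_cases hpk : p.1 = k
      · have hpw := pv_item_unique g hnd k w hw p hp hpk
        simp [hpw]
      · simp [hpk]
    cases hag : pvAgg w with
    | none =>
      -- sticky None: A leaves the dict alone; B's reduced entry stays None
      rw [hmap]
      have hagg : pvAgg (w ++ [some v]) = none := by rw [pvAgg_append_seq, hag]
      show h.items = _
      have hid : ∀ p ∈ h.items,
          (if (p.1 == k) = true then (k, pvAgg (w ++ [some v])) else p) = p := by
        intro p hp
        by_cases hpk : p.1 = k
        · have hq := PySem.Dict.get?_of_mem_items h hp (hkeys ▸ hnd)
          rw [hpk, hgeth, hag] at hq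
          obtain ⟨a, b⟩ := p
          simp only at hpk
          subst hpk
          simp only [Option.some.injEq] at hq
          simp [hagg, ← hq]
        · simp [hpk]
      rw [List.map_congr_left hid]; simp
    | some s =>
      rw [hmap, PySem.Dict.items_insert_of_contains _ _ (hc.trans hk)]
      have hagg : pvAgg (w ++ [some v]) = some (PySem.Set.add s v) := by
        rw [pvAgg_append_seq, hag]
      refine List.map_congr_left (fun p hp => ?_)
      by_cases hpk : p.1 = k
      · simp [hpk, hagg]
      · simp [hpk]
  · -- new key: getD gives [], A inserts {v}, B's reduced entry is some {v}
    have hgeth : h.get? k = none := by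
      rw [PySem.Dict.get?_eq_none_iff_not_mem_keys, hkeys,
        ← PySem.Dict.contains_iff_mem_keys]
      simpa using hk
    rw [hgeth, PySem.Dict.items_insert_of_not_contains _ _ (by simp [hc, hk]),
      PySem.Dict.items_insert_of_not_contains _ _ (by simpa using hk), hitems, List.map_append,
      PySem.Dict.getD_of_not_contains _ _ (by simpa using hk)]
    simp [pvAgg, PySem.Set.empty]

set_option maxHeartbeats 1000000 in
lemma pvInv_step (h : PySem.Dict String (Option (List Int)))
    (g : PySem.Dict String (List (Option Int))) (t : String) (hI : pvInv h g) :
    pvInv (pvA_step h t) ((pvClassify t).toList.foldl pvGroupStep g) := by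
  simp only [pvA_step, pvClassify]
  by_cases h1 : PySem.Str.strip t = ""
  · rw [if_pos h1, if_pos h1]; simpa using hI
  · rw [if_neg h1, if_neg h1]
    by_cases h2 : PySem.Str.lower (PySem.Str.strip t) = "all"
    · rw [if_pos h2, if_pos h2]; exact pvInv_bare h g "__all__" hI
    · rw [if_neg h2, if_neg h2]
      by_cases h3 : PySem.Str.isIn ":" (PySem.Str.strip t) = true
      · rw [if_pos h3, if_pos h3]
        match hsp : PySem.Str.splitMax? (PySem.Str.strip t) ":" 1 with
        | none => simpa using hI
        | some [] => simpa using hI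
        | some [a] => simpa using hI
        | some (a :: b :: rest) =>
          dsimp only
          by_cases h4 : PySem.Str.strip a = ""
          · rw [if_pos h4, if_pos h4]; simpa using hI
          · rw [if_neg h4, if_neg h4]
            by_cases h5 : PySem.Str.strip b = ""
            · rw [if_pos h5, if_pos h5]; simpa using hI
            · rw [if_neg h5, if_neg h5]
              match hn : PySem.Int.ofStr? (PySem.Str.strip b) with
              | none => simpa using hI
              | some v => exact pvInv_seq h g (PySem.Str.strip a) v hI
      · rw [if_neg h3, if_neg h3]
        exact pvInv_bare h g (PySem.Str.strip t) hI

lemma pvInv_fold_tokens (ts : List String) (h : PySem.Dict String (Option (List Int)))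
    (g : PySem.Dict String (List (Option Int))) (hI : pvInv h g) :
    pvInv (ts.foldl pvA_step h) ((ts.filterMap pvClassify).foldl pvGroupStep g) := by
  induction ts generalizing h g with
  | nil => simpa using hI
  | cons t ts ih =>
    have hstep := pvInv_step h g t hI
    rw [List.foldl_cons, List.filterMap_cons]
    cases hc : pvClassify t with
    | none => rw [hc] at hstep; exact ih _ _ (by simpa using hstep)
    | some e => rw [hc] at hstep; exact ih _ _ (by simpa using hstep)

lemma pvInv_fold_groups (gs : List String) (h : PySem.Dict String (Option (List Int)))
    (g : PySem.Dict String (List (Option Int))) (hI : pvInv h g) :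
    pvInv (gs.foldl (fun h gr => ((PySem.Str.split? gr ",").getD []).foldl pvA_step h) h)
      ((gs.flatMap (fun gr => ((PySem.Str.split? gr ",").getD []).filterMap pvClassify)).foldl
        pvGroupStep g) := by
  induction gs generalizing h g with
  | nil => simpa using hI
  | cons gr gs ih =>
    rw [List.foldl_cons, List.flatMap_cons, List.foldl_append]
    exact ih _ _ (pvInv_fold_tokens _ h g hI)

-- the grouping dict's key set is exactly the event keys (first occurrences in order)
lemma pv_keys_group (events : List (String × Option Int)) :
    (events.foldl pvGroupStep PySem.Dict.empty).keys = PySem.Set.ofList (events.map Prod.fst) := by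
  have := PySem.Dict.keys_foldl_modify_key (key := fun e : String × Option Int => e.1)
    (f := fun (d : PySem.Dict String (List (Option Int))) e => fun vs => vs ++ [e.2])
    (l := events) (d := PySem.Dict.empty) (d0 := [])
  simpa [pvGroupStep, PySem.Dict.keys_empty, PySem.Set.update, PySem.Set.ofList_eq_foldl] using this

lemma pv_final (h : PySem.Dict String (Option (List Int))) (events : List (String × Option Int))
    (hI : pvInv h (events.foldl pvGroupStep PySem.Dict.empty)) :
    (if h.contains "__all__" then [("__all__", (none : Option (List Int)))] else h.items)
      = (if events.any (fun e => e.1 == "__all__") then [("__all__", none)]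
         else (events.foldl pvGroupStep PySem.Dict.empty).items.map (fun p => (p.1, pvAgg p.2))) := by
  have hc : h.contains "__all__" = events.any (fun e => e.1 == "__all__") := by
    rw [pv_contains_eq h _ hI, PySem.Dict.contains_eq_decide_mem_keys, pv_keys_group]
    rcases hb : events.any (fun e => e.1 == "__all__") with _ | _
    · simp only [List.any_eq_false] at hb
      simp only [decide_eq_false_iff_not, PySem.Set.mem_ofList, List.mem_map]
      rintro ⟨e, he, h1⟩
      exact absurd (by simpa using h1) (by simpa using hb e he)
    · simp only [List.any_eq_true] at hb
      obtain ⟨e, he, h1⟩ := hb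
      simp only [decide_eq_true_eq, PySem.Set.mem_ofList, List.mem_map]
      exact ⟨e, he, by simpa using h1⟩
  rw [hc]
  by_cases hall : events.any (fun e => e.1 == "__all__") = true
  · rw [if_pos hall, if_pos hall]
  · rw [if_neg hall, if_neg hall, hI.1]

-- ===== VERDICT (by name: the statement is the Claim_ definition above) =====
theorem parse_observation_highlights_spec : Claim_equal_parse_observation_highlights := by
  intro args _
  unfold Spec_parse_observation_highlights parse_observation_highlights parse_observation_highlights_alt
  match args with
  | none => rfl
  | some groups =>
    cases groups with
    | nil => rfl
    | cons g gs =>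
      simp only [Option.getD, List.isEmpty_cons]
      have hI0 : pvInv PySem.Dict.empty PySem.Dict.empty := ⟨rfl, List.nodup_nil⟩
      have hR := pvInv_fold_groups (g :: gs) PySem.Dict.empty PySem.Dict.empty hI0
      exact pv_final _ _ hR
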